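-- pv_equiv track=rewrite | github.com/jonh-t/advent_of_code_2022 | day_3/day_3_1.py | find_matches
-- ===== SOURCE A (Python) =====
-- def find_matches(s1, s2):
--     chars = {}
--     for s in s1:
--         chars[s] = {1}
--
--     for s in s2:
--         if s in chars.keys():
--             chars[s].add(2)
--         else:
--             chars[s] = {2}
--
--     matches = []
--     for k in chars:
--         if len(chars[k]) > 1:
--             matches.append(k)
--
--     return matches
-- ===== SOURCE B (Python) =====
-- def find_matches(s1, s2):
--     s2set = set(s2)
--     seen = set()
--     matches = []
--     for c in s1:
--         if c in s2set and c not in seen: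
--             seen.add(c)
--             matches.append(c)
--     return matches
-- ===== Notes on version B (the rewrite author's own statement) =====
-- stated objective: simpler
-- what changed: Replaces A's three passes (build a char->set-of-markers dict over s1, update it over s2, then filter the dict) with a single pass over s1 guarded by a precomputed set(s2) and a 'seen' set for dedup.
import Mathlib
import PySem

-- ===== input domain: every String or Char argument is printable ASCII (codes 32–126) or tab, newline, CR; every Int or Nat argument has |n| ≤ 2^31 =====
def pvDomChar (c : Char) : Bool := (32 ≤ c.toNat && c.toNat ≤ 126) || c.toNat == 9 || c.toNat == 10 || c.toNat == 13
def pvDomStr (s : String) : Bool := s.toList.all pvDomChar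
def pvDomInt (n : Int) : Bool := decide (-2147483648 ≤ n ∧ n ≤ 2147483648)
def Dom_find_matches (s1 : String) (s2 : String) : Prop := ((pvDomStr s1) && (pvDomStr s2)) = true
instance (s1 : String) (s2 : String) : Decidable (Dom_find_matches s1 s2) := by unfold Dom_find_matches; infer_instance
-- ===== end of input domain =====

-- B replaces A's three passes (dict of marker-sets over s1, update over s2, filter the dict)
-- with one pass over s1 guarded by set(s2) and a seen-set; objective: simpler.

-- ===== PORT A =====
-- body of A's second loop (the 'for s in s2' loop)
def matchStep2 (d : PySem.Dict Char (PySem.Set Int)) (c : Char) : PySem.Dict Char (PySem.Set Int) :=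
  if d.contains c then d.modify c PySem.Set.empty (fun v => PySem.Set.add v 2)
  else d.insert c (PySem.Set.ofList [2])

def find_matches (s1 : String) (s2 : String) : List String :=
  let chars1 : PySem.Dict Char (PySem.Set Int) :=
    s1.toList.foldl (fun d c => d.insert c (PySem.Set.ofList [1])) PySem.Dict.empty
  let chars2 : PySem.Dict Char (PySem.Set Int) := s2.toList.foldl matchStep2 chars1
  chars2.keys.foldl
    (fun ms k => if 1 < PySem.Set.len (chars2.getD k PySem.Set.empty) then ms ++ [String.ofList [k]] else ms)
    []

-- ===== PORT B =====
-- body of B's single loop over s1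
def altStep (s2set : PySem.Set Char) (st : PySem.Set Char × List String) (c : Char) :
    PySem.Set Char × List String :=
  if s2set.contains c && !(st.1.contains c) then (st.1.add c, st.2 ++ [String.ofList [c]]) else st

def find_matches_alt (s1 : String) (s2 : String) : List String :=
  let s2set : PySem.Set Char := PySem.Set.ofList s2.toList
  (s1.toList.foldl (altStep s2set) (PySem.Set.empty, [])).2

-- ===== PRECONDITION & SPEC =====
def Spec_find_matches (s1 : String) (s2 : String) (out : List String) : Prop := out = find_matches_alt s1 s2
instance (s1 : String) (s2 : String) (out : List String) : Decidable (Spec_find_matches s1 s2 out) := by unfold Spec_find_matches; infer_instance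

-- ===== CLAIM (what is proved, stated in full; the proofs are below) =====
def Claim_equal_find_matches : Prop := ∀ (s1 : String) (s2 : String), Dom_find_matches s1 s2 → Spec_find_matches s1 s2 (find_matches s1 s2)

-- ===== LEMMAS AND PROOFS =====

-- A's first loop: value stored at c is {1} exactly for the chars of s1
lemma getD_loop1 (l : List Char) (d : PySem.Dict Char (PySem.Set Int)) (c : Char) :
    (l.foldl (fun d c => d.insert c (PySem.Set.ofList [1])) d).getD c PySem.Set.empty
      = if c ∈ l then PySem.Set.ofList [1] else d.getD c PySem.Set.empty := by
  induction l generalizing d with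
  | nil => simp
  | cons a l ih =>
    simp only [List.foldl_cons]
    rw [ih]
    by_cases h : c ∈ l
    · simp [h]
    · by_cases h2 : c = a <;> simp [h, h2, PySem.Dict.getD_insert]

-- A's second loop: effect on the stored value at c
lemma getD_loop2 (l : List Char) (d : PySem.Dict Char (PySem.Set Int)) (c : Char) :
    (l.foldl matchStep2 d).getD c PySem.Set.empty
      = if c ∈ l then
          (if d.contains c then PySem.Set.add (d.getD c PySem.Set.empty) 2 else PySem.Set.ofList [2])
        else d.getD c PySem.Set.empty := by
  induction l generalizing d with
  | nil => simp
  | cons a l ih =>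
    simp only [List.foldl_cons]
    rw [ih]
    by_cases h2 : c = a
    · subst h2
      by_cases hc : d.contains c
      · simp [matchStep2, hc, PySem.Dict.contains_modify]
      · simp only [Bool.not_eq_true] at hc
        by_cases h : c ∈ l <;>
          simp [matchStep2, hc, h]
    · have hco : (matchStep2 d a).contains c = d.contains c := by
        unfold matchStep2
        split <;> simp [PySem.Dict.contains_modify, PySem.Dict.contains_insert, h2]
      have hgd : (matchStep2 d a).getD c PySem.Set.empty = d.getD c PySem.Set.empty := by
        unfold matchStep2
        split <;> simp [PySem.Dict.getD_modify, PySem.Dict.getD_insert, h2]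
      rw [hco, hgd]
      simp [List.mem_cons, h2]

-- A's second loop: keys become old keys updated with l
lemma keys_loop2 (l : List Char) (d : PySem.Dict Char (PySem.Set Int)) :
    (l.foldl matchStep2 d).keys = PySem.Set.update d.keys l := by
  induction l generalizing d with
  | nil => simp [PySem.Set.update]
  | cons a l ih =>
    simp only [List.foldl_cons]
    rw [ih, PySem.Set.update_cons]
    congr 1
    by_cases hc : d.contains a
    · have hmem : a ∈ d.keys := (PySem.Dict.contains_iff_mem_keys d a).mp hc
      rw [PySem.Set.add_of_mem hmem]
      unfold matchStep2
      rw [if_pos hc, PySem.Dict.keys_modify, PySem.Dict.keys_insert_of_contains _ _ hc]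
    · simp only [Bool.not_eq_true] at hc
      have hmem : a ∉ d.keys := fun h => by
        simp [(PySem.Dict.contains_iff_mem_keys d a).mpr h] at hc
      rw [PySem.Set.add_of_not_mem hmem]
      unfold matchStep2
      rw [if_neg (by simp [hc]), PySem.Dict.keys_insert_of_not_contains _ _ hc]

-- dedup commutes with filter
lemma ofList_filter (q : Char → Bool) (l : List Char) :
    PySem.Set.ofList (l.filter q) = (PySem.Set.ofList l).filter q := by
  induction l with
  | nil => simp [PySem.Set.ofList]
  | cons a l ih =>
    by_cases hq : q a
    · rw [List.filter_cons_of_pos hq, PySem.Set.ofList_cons, PySem.Set.ofList_cons, ih]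
      simp only [List.filter_cons_of_pos hq, PySem.Set.discard, List.filter_filter]
      congr 1
      apply List.filter_congr
      intro x _
      by_cases hx : q x <;> simp [hx]
    · rw [List.filter_cons_of_neg hq, PySem.Set.ofList_cons, ih]
      simp only [List.filter_cons_of_neg hq, PySem.Set.discard, List.filter_filter]
      apply List.filter_congr
      intro x _
      by_cases hx : q x
      · have : ¬ (x == a) := fun h => hq (by rwa [← (beq_iff_eq).mp h])
        simp [hx, this]
      · simp [hx]

-- B's loop: the accumulated matches are the new s2-chars of the prefix, in order
lemma contains_append_single (seen : List Char) (a x : Char) :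
    PySem.Set.contains (seen ++ [a]) x = (PySem.Set.contains seen x || x == a) := by
  by_cases hx : x = a <;> by_cases hs : x ∈ seen <;>
    simp [PySem.Set.contains, hx, hs]

lemma alt_fold (s2l : List Char) (l : List Char) (seen : PySem.Set Char) (acc : List String) :
    (l.foldl (altStep (PySem.Set.ofList s2l)) (seen, acc)).2
      = acc ++ ((PySem.Set.ofList (l.filter (fun c => decide (c ∈ s2l)))).filter
          (fun c => !(PySem.Set.contains seen c))).map (fun c => String.ofList [c]) := by
  induction l generalizing seen acc with
  | nil => simp [PySem.Set.ofList]
  | cons a l ih =>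
    simp only [List.foldl_cons]
    by_cases h2 : a ∈ s2l
    · rw [List.filter_cons_of_pos (by simp [h2]), PySem.Set.ofList_cons]
      by_cases hs : a ∈ seen
      · have hcond : altStep (PySem.Set.ofList s2l) (seen, acc) a = (seen, acc) := by
          unfold altStep; rw [if_neg]; simp [PySem.Set.contains, hs]
        rw [hcond, ih, List.filter_cons_of_neg (by simp [PySem.Set.contains, hs])]
        have heq : ((PySem.Set.ofList (List.filter (fun c => decide (c ∈ s2l)) l)).discard a).filter
              (fun c => !(PySem.Set.contains seen c))
            = (PySem.Set.ofList (List.filter (fun c => decide (c ∈ s2l)) l)).filter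
              (fun c => !(PySem.Set.contains seen c)) := by
          simp only [PySem.Set.discard, List.filter_filter]
          apply List.filter_congr
          intro x _
          by_cases hxs : x ∈ seen
          · simp [PySem.Set.contains, hxs]
          · have hxa : x ≠ a := fun h => hxs (h ▸ hs)
            simp [PySem.Set.contains, hxs, hxa]
        rw [heq]
      · have hcond : altStep (PySem.Set.ofList s2l) (seen, acc) a
            = (seen ++ [a], acc ++ [String.ofList [a]]) := by
          unfold altStep
          rw [if_pos (by simp [PySem.Set.contains, PySem.Set.mem_ofList, h2, hs])]
          rw [PySem.Set.add_of_not_mem hs]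
        rw [hcond, ih, List.filter_cons_of_pos (by simp [PySem.Set.contains, hs])]
        have heq : (PySem.Set.ofList (List.filter (fun c => decide (c ∈ s2l)) l)).filter
              (fun c => !(PySem.Set.contains (seen ++ [a]) c))
            = ((PySem.Set.ofList (List.filter (fun c => decide (c ∈ s2l)) l)).discard a).filter
              (fun c => !(PySem.Set.contains seen c)) := by
          simp only [PySem.Set.discard, List.filter_filter]
          apply List.filter_congr
          intro x _
          rw [contains_append_single]
          cases hb : PySem.Set.contains seen x <;> by_cases hxa : x = a <;> simp [hxa]
        rw [heq]
        simp
    · have hcond : altStep (PySem.Set.ofList s2l) (seen, acc) a = (seen, acc) := by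
        unfold altStep; rw [if_neg]
        simp [PySem.Set.contains, PySem.Set.mem_ofList, h2]
      rw [hcond, ih, List.filter_cons_of_neg (by simp [h2])]

-- A computes dedup(s1) filtered by membership in s2, rendered as 1-char strings
lemma find_matches_eq (s1 s2 : String) :
    find_matches s1 s2
      = ((PySem.Set.ofList s1.toList).filter (fun c => decide (c ∈ s2.toList))).map
          (fun c => String.ofList [c]) := by
  unfold find_matches
  simp only []
  set s1l := s1.toList
  set s2l := s2.toList
  set chars1 : PySem.Dict Char (PySem.Set Int) :=
    s1l.foldl (fun d c => d.insert c (PySem.Set.ofList [1])) PySem.Dict.empty with hchars1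
  set chars2 : PySem.Dict Char (PySem.Set Int) := s2l.foldl matchStep2 chars1 with hchars2
  have hk1 : chars1.keys = PySem.Set.ofList s1l := by
    rw [hchars1, PySem.Dict.keys_foldl_insert s1l (fun _ _ => PySem.Set.ofList [1])]
    simp only [PySem.Dict.keys_empty]
    exact PySem.Set.update_empty s1l
  have hc1 : ∀ c, chars1.contains c = decide (c ∈ s1l) := by
    intro c
    by_cases h : c ∈ s1l
    · simp [h, (PySem.Dict.contains_iff_mem_keys chars1 c).mpr (by rw [hk1]; exact (PySem.Set.mem_ofList _ _).mpr h)]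
    · simp only [h, decide_false]
      rw [← Bool.not_eq_true]
      intro hc
      exact h ((PySem.Set.mem_ofList _ _).mp (by rw [← hk1]; exact (PySem.Dict.contains_iff_mem_keys chars1 c).mp hc))
  have hg1 : ∀ c, c ∈ s1l → chars1.getD c PySem.Set.empty = PySem.Set.ofList [1] := by
    intro c h
    rw [hchars1, getD_loop1, if_pos h]
  have hk2 : chars2.keys = PySem.Set.update (PySem.Set.ofList s1l) s2l := by
    rw [hchars2, keys_loop2, hk1]
  have hfold := PySem.List.foldl_append_if
      (fun k => decide (1 < PySem.Set.len (chars2.getD k PySem.Set.empty)))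
      (fun k => String.ofList [k]) chars2.keys []
  simp only [decide_eq_true_eq] at hfold
  rw [hfold, List.nil_append, hk2, PySem.Set.update_eq_append_filter, List.filter_append]
  have hextra : ((PySem.Set.ofList s2l).filter
        (fun y => !(PySem.Set.ofList s1l).contains y)).filter
        (fun k => decide (1 < PySem.Set.len (chars2.getD k PySem.Set.empty))) = [] := by
    rw [List.filter_eq_nil_iff]
    intro k hk
    rw [List.mem_filter] at hk
    obtain ⟨hk2', hk1'⟩ := hk
    have hks2 : k ∈ s2l := (PySem.Set.mem_ofList _ _).mp hk2'
    have hks1 : k ∉ s1l := by simpa using hk1'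
    have : chars2.getD k PySem.Set.empty = PySem.Set.ofList [2] := by
      rw [hchars2, getD_loop2, if_pos hks2, hc1 k, if_neg (by simp [hks1])]
    simp only [this, decide_eq_true_eq]
    decide
  rw [hextra, List.append_nil]
  congr 1
  apply List.filter_congr
  intro k hk
  have hks1 : k ∈ s1l := (PySem.Set.mem_ofList _ _).mp hk
  have hval : chars2.getD k PySem.Set.empty
      = if k ∈ s2l then PySem.Set.add (PySem.Set.ofList [1]) 2 else PySem.Set.ofList [1] := by
    rw [hchars2, getD_loop2, hc1 k, hg1 k hks1]
    by_cases h : k ∈ s2l <;> simp [h, hks1]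
  by_cases h : k ∈ s2l
  · rw [hval, if_pos h]
    simp [h, PySem.Set.add, PySem.Set.len, PySem.Set.ofList, PySem.Set.contains]
  · rw [hval, if_neg h]
    simp [h, PySem.Set.len, PySem.Set.ofList]

-- B computes the same list
lemma find_matches_alt_eq (s1 s2 : String) :
    find_matches_alt s1 s2
      = ((PySem.Set.ofList s1.toList).filter (fun c => decide (c ∈ s2.toList))).map
          (fun c => String.ofList [c]) := by
  unfold find_matches_alt
  simp only []
  rw [show (PySem.Set.empty : PySem.Set Char) = [] from rfl]
  rw [alt_fold s2.toList s1.toList [] []]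
  rw [ofList_filter]
  simp [PySem.Set.contains]

-- ===== VERDICT (by name: the statement is the Claim_ definition above) =====
theorem find_matches_spec : Claim_equal_find_matches := by
  intro s1 s2 _
  unfold Spec_find_matches
  rw [find_matches_eq, find_matches_alt_eq]
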